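-- pv_equiv track=rewrite | github.com/getsentry/sentry | src/sentry/ddm/api.py | _get_granularity
-- ===== SOURCE A (Python) =====
-- from typing import Any, Dict, List, Mapping, Optional, Sequence, Tuple, Union
--
-- GRANULARITIES = [
--     10,  # 10 seconds
--     60,  # 1 minute
--     60 * 60,  # 1 hour
--     60 * 60 * 24,  # 24 hours
-- ]
--
-- class InvalidMetricsQuery(Exception):
--     pass
--
-- def _get_granularity(time_seconds: int) -> int:
--     """
--     Determines the optimal granularity to resolve a query over an interval of time_seconds.
--     """
--     best_granularity: Optional[int] = None
--
--     for granularity in sorted(GRANULARITIES):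
--         if granularity <= time_seconds:
--             best_granularity = granularity
--
--     if best_granularity is None:
--         raise InvalidMetricsQuery("The time specified is lower than the minimum granularity")
--
--     return best_granularity
-- ===== SOURCE B (Python) =====
-- import bisect
--
-- GRANULARITIES = [
--     10,  # 10 seconds
--     60,  # 1 minute
--     60 * 60,  # 1 hour
--     60 * 60 * 24,  # 24 hours
-- ]
--
-- class InvalidMetricsQuery(Exception):
--     pass
--
-- def _get_granularity(time_seconds: int) -> int:
--     """
--     Determines the optimal granularity to resolve a query over an interval of time_seconds.
--     """
--     idx = bisect.bisect_right(GRANULARITIES, time_seconds)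
--     if idx == 0:
--         raise InvalidMetricsQuery("The time specified is lower than the minimum granularity")
--     return GRANULARITIES[idx - 1]
-- ===== Notes on version B (the rewrite author's own statement) =====
-- stated objective: idiomatic
-- what changed: Replaced the linear scan-and-track loop over sorted(GRANULARITIES) with a bisect_right binary search into the sorted constant list, returning GRANULARITIES[idx-1].
import Mathlib
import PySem

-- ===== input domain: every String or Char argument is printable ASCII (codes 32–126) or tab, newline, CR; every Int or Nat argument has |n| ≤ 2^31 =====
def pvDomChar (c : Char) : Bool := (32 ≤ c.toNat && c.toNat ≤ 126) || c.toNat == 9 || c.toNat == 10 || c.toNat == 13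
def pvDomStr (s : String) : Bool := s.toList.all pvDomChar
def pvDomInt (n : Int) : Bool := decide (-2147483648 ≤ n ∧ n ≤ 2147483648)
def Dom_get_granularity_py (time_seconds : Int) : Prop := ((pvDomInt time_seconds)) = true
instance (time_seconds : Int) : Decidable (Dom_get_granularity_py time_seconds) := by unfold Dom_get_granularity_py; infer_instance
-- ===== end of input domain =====

-- B replaces A's linear scan-and-track loop with a bisect_right binary search into
-- the sorted constant list (more idiomatic); same return value wherever A returns.

def GRANULARITIES : List Int := [10, 60, 60 * 60, 60 * 60 * 24]

-- ===== PORT A =====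
-- for granularity in sorted(GRANULARITIES): if granularity <= t: best = granularity
def get_granularity_py (time_seconds : Int) : Int :=
  let best : Option Int :=
    (PySem.List.sorted GRANULARITIES (fun x => x) false).foldl
      (fun best g => if g ≤ time_seconds then some g else best) none
  match best with
  | none => 0   -- Python raises InvalidMetricsQuery here; excluded by Pre_
  | some g => g

-- ===== PORT B =====
-- idx = bisect.bisect_right(GRANULARITIES, t); if idx == 0: raise; return GRANULARITIES[idx-1]
def get_granularity_py_alt (time_seconds : Int) : Int :=
  let idx := PySem.List.bisectRight GRANULARITIES time_seconds
  if idx = 0 then 0   -- Python raises InvalidMetricsQuery here; excluded by Pre_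
  else (PySem.List.pyGet? GRANULARITIES ((idx : Int) - 1)).getD 0

-- ===== PRECONDITION & SPEC =====
-- Pre_ excludes exactly time_seconds < 10, where Python A (and B) raise InvalidMetricsQuery.
def Pre_get_granularity_py (time_seconds : Int) : Prop := 10 ≤ time_seconds
instance (time_seconds : Int) : Decidable (Pre_get_granularity_py time_seconds) := by unfold Pre_get_granularity_py; infer_instance
def pvWitness_get_granularity_py : Int := 75

def Spec_get_granularity_py (time_seconds : Int) (out : Int) : Prop := out = get_granularity_py_alt time_seconds
instance (time_seconds : Int) (out : Int) : Decidable (Spec_get_granularity_py time_seconds out) := by unfold Spec_get_granularity_py; infer_instance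

-- ===== CLAIM (what is proved, stated in full; the proofs are below) =====
def Claim_equal_get_granularity_py : Prop := ∀ (time_seconds : Int), Dom_get_granularity_py time_seconds → Pre_get_granularity_py time_seconds → Spec_get_granularity_py time_seconds (get_granularity_py time_seconds)

-- ===== LEMMAS AND PROOFS =====

-- A's fold over the (already sorted) constant list, as a piecewise closed form.
theorem portA_closed (t : Int) (h : 10 ≤ t) :
    get_granularity_py t =
      if t < 60 then 10 else if t < 3600 then 60 else if t < 86400 then 3600 else 86400 := by
  have hs : PySem.List.sorted [(10:Int), 60, 60 * 60, 60 * 60 * 24] (fun x => x) false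
      = [(10:Int), 60, 60 * 60, 60 * 60 * 24] := by decide
  simp only [get_granularity_py, GRANULARITIES, hs, List.foldl]
  split_ifs <;> simp <;> omega

-- B's bisect index, pinned by bisectRight_spec case by case.
theorem portB_closed (t : Int) (h : 10 ≤ t) :
    get_granularity_py_alt t =
      if t < 60 then 10 else if t < 3600 then 60 else if t < 86400 then 3600 else 86400 := by
  have hsorted : GRANULARITIES.Pairwise (fun a b => a ≤ b) := by decide
  obtain ⟨hle, hlo, hhi⟩ := PySem.List.bisectRight_spec GRANULARITIES t hsorted
  set idx := PySem.List.bisectRight GRANULARITIES t with hidx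
  have hlen : GRANULARITIES.length = 4 := by decide
  have hidx1 : 1 ≤ idx := by
    by_contra hc
    have := hhi 0 (by simp [GRANULARITIES]) (by omega)
    simp [GRANULARITIES] at this
    omega
  have hval : ∀ n : Nat, idx = n + 1 →
      get_granularity_py_alt t = (PySem.List.pyGet? GRANULARITIES ((n + 1 : Int) - 1)).getD 0 := by
    intro n hn
    simp only [get_granularity_py_alt, ← hidx, hn]
    norm_num
  by_cases c1 : t < 60
  · have : idx ≤ 1 := by
      by_contra hc
      have := hlo 1 (by simp [GRANULARITIES]) (by omega)
      simp [GRANULARITIES] at this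
      omega
    have he : idx = 1 := by omega
    rw [hval 0 he]
    simp [c1]
    decide
  · by_cases c2 : t < 3600
    · have : idx ≤ 2 := by
        by_contra hc
        have := hlo 2 (by simp [GRANULARITIES]) (by omega)
        simp [GRANULARITIES] at this
        omega
      have h2le : 2 ≤ idx := by
        by_contra hc
        have := hhi 1 (by simp [GRANULARITIES]) (by omega)
        simp [GRANULARITIES] at this
        omega
      have he : idx = 2 := by omega
      rw [hval 1 he]
      simp [c1, c2]
      decide
    · by_cases c3 : t < 86400
      · have : idx ≤ 3 := by
          by_contra hc
          have := hlo 3 (by simp [GRANULARITIES]) (by omega)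
          simp [GRANULARITIES] at this
          omega
        have h3le : 3 ≤ idx := by
          by_contra hc
          have := hhi 2 (by simp [GRANULARITIES]) (by omega)
          simp [GRANULARITIES] at this
          omega
        have he : idx = 3 := by omega
        rw [hval 2 he]
        simp [c1, c2, c3]
        decide
      · have h4le : 4 ≤ idx := by
          by_contra hc
          have := hhi 3 (by simp [GRANULARITIES]) (by omega)
          simp [GRANULARITIES] at this
          omega
        have he : idx = 4 := by omega
        rw [hval 3 he]
        simp [c1, c2, c3]
        decide

-- ===== VERDICT (by name: the statement is the Claim_ definition above) =====
theorem get_granularity_py_spec : Claim_equal_get_granularity_py := by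
  intro t _ hpre
  unfold Spec_get_granularity_py
  rw [portA_closed t hpre, portB_closed t hpre]
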